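-- pv_equiv track=rewrite | github.com/hdalton13/cos120 | LABS/LAB10/num_lab10.py | aListOfListsDupes
-- ===== SOURCE A (Python) =====
-- def aListOfListsDupes(aListOfLists):
--     full=[]
--     for i in aListOfLists:
--         alist=i[:]
--         repeated=[]
--         notRep=[]
--         for k in range(len(alist)):
--             if alist[k] not in notRep:
--                 notRep.append(alist[k])
--             elif alist[k] not in repeated:
--                 repeated.append(alist[k])
--         full.append(repeated)
--     return full
-- ===== SOURCE B (Python) =====
-- def aListOfListsDupes(aListOfLists):
--     # x is a duplicate's second occurrence exactly when its prefix contains it once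
--     return [[x for k, x in enumerate(sub) if sub[:k].count(x) == 1]
--             for sub in aListOfLists]
-- ===== Notes on version B (the rewrite author's own statement) =====
-- stated objective: simpler
-- what changed: Replaces A's stateful two-list seen/emitted bookkeeping loop with a stateless declarative comprehension: keep element at index k exactly when the prefix sub[:k] contains it exactly once (its second occurrence).
import Mathlib
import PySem

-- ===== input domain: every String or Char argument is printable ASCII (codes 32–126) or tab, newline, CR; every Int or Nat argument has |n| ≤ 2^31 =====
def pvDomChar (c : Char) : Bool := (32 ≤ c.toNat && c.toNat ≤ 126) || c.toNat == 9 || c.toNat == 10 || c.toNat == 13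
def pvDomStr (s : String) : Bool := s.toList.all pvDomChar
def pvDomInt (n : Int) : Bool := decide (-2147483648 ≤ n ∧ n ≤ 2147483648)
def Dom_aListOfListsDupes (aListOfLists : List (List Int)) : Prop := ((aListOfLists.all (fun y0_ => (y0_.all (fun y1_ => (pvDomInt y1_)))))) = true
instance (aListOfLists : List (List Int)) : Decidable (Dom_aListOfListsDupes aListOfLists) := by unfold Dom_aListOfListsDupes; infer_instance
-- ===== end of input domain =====

-- B replaces A's stateful two-list bookkeeping with a stateless comprehension:
-- keep sub[k] exactly when the prefix sub[:k] contains it exactly once (simpler, declarative).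


-- ===== PORT A =====
-- inner loop of A: state (repeated, notRep), k over range(len(alist)), alist[k] via pyGetD (k always in range)
def pvAStep (alist : List Int) (st : List Int × List Int) (k : Int) : List Int × List Int :=
  let x := PySem.List.pyGetD alist k 0
  if x ∉ st.2 then (st.1, st.2 ++ [x])
  else if x ∉ st.1 then (st.1 ++ [x], st.2)
  else st

def aListOfListsDupes (aListOfLists : List (List Int)) : List (List Int) :=
  aListOfLists.foldl
    (fun full i =>
      let alist := PySem.List.slice i none none
      let st := (PySem.List.pyRange 0 (alist.length : Int) 1).foldl (pvAStep alist) ([], [])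
      full ++ [st.1])
    []

-- ===== PORT B =====
-- [x for k, x in enumerate(sub) if sub[:k].count(x) == 1]
def pvDupes (sub : List Int) : List Int :=
  ((PySem.List.enumerate sub 0).filter
      (fun kx => PySem.List.count (PySem.List.slice sub none (some kx.1)) kx.2 == 1)).map (·.2)

def aListOfListsDupes_alt (aListOfLists : List (List Int)) : List (List Int) :=
  aListOfLists.map pvDupes

-- ===== PRECONDITION & SPEC =====
def Spec_aListOfListsDupes (aListOfLists : List (List Int)) (out : List (List Int)) : Prop := out = aListOfListsDupes_alt aListOfLists
instance (aListOfLists : List (List Int)) (out : List (List Int)) : Decidable (Spec_aListOfListsDupes aListOfLists out) := by unfold Spec_aListOfListsDupes; infer_instance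

-- ===== CLAIM =====
def Claim_equal_aListOfListsDupes : Prop := ∀ (aListOfLists : List (List Int)), Dom_aListOfListsDupes aListOfLists → Spec_aListOfListsDupes aListOfLists (aListOfListsDupes aListOfLists)

-- ===== LEMMAS AND PROOFS =====

-- pure Nat-indexed version of B's inner comprehension, used only in the proofs
def pvSeconds (p : List Int) : List Int :=
  ((PySem.List.enumerate p 0).filter
      (fun kx => (p.take kx.1.toNat).count kx.2 == 1)).map (·.2)

theorem pvDupes_eq_seconds (sub : List Int) : pvDupes sub = pvSeconds sub := by
  unfold pvDupes pvSeconds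
  congr 1
  apply List.filter_congr
  intro kx hkx
  obtain ⟨k, hk, rfl⟩ := (PySem.List.mem_enumerate_iff _ _ _).mp hkx
  simp [PySem.List.count_eq, PySem.List.slice_to_natCast]

theorem pvSeconds_append (p : List Int) (x : Int) :
    pvSeconds (p ++ [x]) = pvSeconds p ++ (if p.count x = 1 then [x] else []) := by
  unfold pvSeconds
  rw [PySem.List.enumerate_append, List.filter_append, List.map_append]
  congr 1
  · congr 1
    apply List.filter_congr
    intro kx hkx
    obtain ⟨k, hk, rfl⟩ := (PySem.List.mem_enumerate_iff _ _ _).mp hkx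
    have : ((0:Int) + (k:Int)).toNat = k := by omega
    rw [this, List.take_append_of_le_length (by omega)]
  · by_cases h : p.count x = 1 <;>
      simp [PySem.List.enumerate, h]

-- invariant relating A's (repeated, notRep) state after processing prefix p to B's characterization
def pvInv (p : List Int) (st : List Int × List Int) : Prop :=
  st.1 = pvSeconds p ∧ ∀ y : Int, (y ∈ st.2 ↔ 1 ≤ p.count y) ∧ (y ∈ st.1 ↔ 2 ≤ p.count y)

theorem pvCount_append_ne (p : List Int) (x y : Int) (h : ¬ y = x) :
    (p ++ [x]).count y = p.count y := by
  simp [List.count_append, List.count_eq_zero, h]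

theorem pvInv_step (p : List Int) (x : Int) (st : List Int × List Int)
    (h : pvInv p st) : pvInv (p ++ [x]) (pvAStep [x] st 0) := by
  obtain ⟨hrep, hy⟩ := h
  have hx1 := (hy x).1
  have hx2 := (hy x).2
  simp only [pvAStep, PySem.List.pyGetD_zero_cons]
  by_cases hn : x ∈ st.2
  · have hc1 : 1 ≤ p.count x := hx1.mp hn
    by_cases hr : x ∈ st.1
    · have hc2 : 2 ≤ p.count x := hx2.mp hr
      rw [if_neg (not_not_intro hn), if_neg (not_not_intro hr)]
      refine ⟨by rw [hrep, pvSeconds_append, if_neg (by omega), List.append_nil], fun y => ?_⟩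
      rcases hy y with ⟨h1, h2⟩
      by_cases hyx : y = x
      · subst hyx
        simp only [List.count_append, List.count_singleton, h1, h2]
        omega
      · rw [pvCount_append_ne p x y hyx]
        exact ⟨h1, h2⟩
    · have hc : p.count x = 1 := by
        by_contra hne
        exact hr (hx2.mpr (by omega))
      rw [if_neg (not_not_intro hn), if_pos hr]
      refine ⟨by rw [hrep, pvSeconds_append, if_pos hc], fun y => ?_⟩
      rcases hy y with ⟨h1, h2⟩
      by_cases hyx : y = x
      · subst hyx
        have hcy : (p ++ [y]).count y = p.count y + 1 := by simp
        rw [hcy]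
        exact ⟨iff_of_true hn (by omega), iff_of_true (by simp) (by omega)⟩
      · rw [pvCount_append_ne p x y hyx]
        constructor
        · exact h1
        · simpa [List.mem_append, hyx] using h2.trans Iff.rfl
  · have hc0 : p.count x = 0 := by
      have : ¬ 1 ≤ p.count x := fun h => hn (hx1.mpr h)
      omega
    rw [if_pos hn]
    refine ⟨by rw [hrep, pvSeconds_append, if_neg (by omega), List.append_nil], fun y => ?_⟩
    rcases hy y with ⟨h1, h2⟩
    by_cases hyx : y = x
    · subst hyx
      have hcy : (p ++ [y]).count y = p.count y + 1 := by simp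
      rw [hcy]
      refine ⟨iff_of_true (by simp) (by omega), ?_⟩
      rw [h2]
      omega
    · rw [pvCount_append_ne p x y hyx]
      constructor
      · simpa [List.mem_append, hyx] using h1.trans Iff.rfl
      · exact h2

theorem pvFold_inv (rest p : List Int) (st : List Int × List Int) (h : pvInv p st) :
    pvInv (p ++ rest) (rest.foldl (fun st x => pvAStep [x] st 0) st) := by
  induction rest generalizing p st with
  | nil => simpa using h
  | cons x xs ih =>
      have := ih (p ++ [x]) _ (pvInv_step p x st h)
      simpa using this

theorem pvInner_eq (alist : List Int) :
    ((PySem.List.pyRange 0 (alist.length : Int) 1).foldl (pvAStep alist) ([], [])).1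
      = pvDupes alist := by
  have h1 : (PySem.List.pyRange 0 (alist.length : Int) 1).foldl (pvAStep alist) ([], [])
      = (PySem.List.pyRange 0 (alist.length : Int) 1).foldl
          (fun st k => pvAStep [PySem.List.pyGetD alist k 0] st 0) ([], []) := by
    apply PySem.List.foldl_congr_mem
    intro st k hk
    simp [pvAStep, PySem.List.pyGetD_zero_cons]
  rw [h1, PySem.List.foldl_pyRange_zero_pyGetD' alist 0 (fun st v => pvAStep [v] st 0) ([], [])]
  have hinv : pvInv [] ([], []) := by
    refine ⟨rfl, fun y => ?_⟩
    simp
  have := (pvFold_inv alist [] ([], []) hinv).1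
  rw [pvDupes_eq_seconds]
  simpa using this

-- ===== VERDICT =====
theorem aListOfListsDupes_spec : Claim_equal_aListOfListsDupes := by
  intro l _
  unfold Spec_aListOfListsDupes aListOfListsDupes aListOfListsDupes_alt
  rw [PySem.List.foldl_append_singleton_eq_map]
  apply List.map_congr_left
  intro i _
  simp only [PySem.List.slice_none_none]
  exact pvInner_eq i
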